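-- pv_equiv track=rewrite | github.com/fenceMeshwire/python_strings | clear_filename_stem.py | tidy_filename_stem
-- ===== SOURCE A (Python) =====
-- def tidy_filename_stem(filename):
--     for key in REPLACEMENT:
--         value = REPLACEMENT[key]
--         filename = filename.replace(key, value)
--     filename = filename.split('_')
--     filename = list(filter(None, filename))
--     filename = '_'.join(filename)
--     return filename
--
-- REPLACEMENT = {' ': '_', '&': 'and', '/': '_'}
-- ===== SOURCE B (Python) =====
-- def tidy_filename_stem(filename):
--     out = []
--     for ch in filename:
--         if ch == '&':
--             out += 'and'
--         elif ch in ' _/':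
--             if out and out[-1] != '_':
--                 out.append('_')
--         else:
--             out.append(ch)
--     if out and out[-1] == '_':
--         out.pop()
--     return ''.join(out)
-- ===== Notes on version B (the rewrite author's own statement) =====
-- stated objective: alternative
-- what changed: Replaces A's multi-pass pipeline (three whole-string replace passes, split on '_', filter out empties, rejoin) with a single left-to-right pass that maps each character and collapses/strips underscore runs on the fly using only the last emitted character as state.
import Mathlib
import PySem

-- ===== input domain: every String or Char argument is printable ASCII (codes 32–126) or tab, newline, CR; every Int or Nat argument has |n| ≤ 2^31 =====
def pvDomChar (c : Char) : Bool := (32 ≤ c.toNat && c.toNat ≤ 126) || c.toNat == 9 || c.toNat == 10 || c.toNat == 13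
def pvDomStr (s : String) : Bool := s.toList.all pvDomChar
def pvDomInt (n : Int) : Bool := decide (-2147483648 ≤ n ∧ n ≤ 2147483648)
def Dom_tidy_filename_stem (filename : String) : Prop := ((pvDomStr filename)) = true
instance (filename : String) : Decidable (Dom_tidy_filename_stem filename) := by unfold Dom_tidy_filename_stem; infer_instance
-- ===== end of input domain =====

-- B replaces A's multi-pass pipeline (replace×3, split on '_', filter empties, join) by one streaming pass; objective: alternative (same O(n) cost).

-- ===== PORT A =====
def tidy_filename_stem (filename : String) : String :=
  let f1 := PySem.Str.replace filename " " "_"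
  let f2 := PySem.Str.replace f1 "&" "and"
  let f3 := PySem.Str.replace f2 "/" "_"
  let parts := (PySem.Str.split? f3 "_").getD []
  let parts := parts.filter (fun s => s ≠ "")
  PySem.Str.join "_" parts

-- ===== PORT B =====
-- out is the Python list `out` (in order); at end of input, pop one trailing '_' if present.
def tidyLoop : List Char → List Char → List Char
  | [], out => if out ≠ [] ∧ out.getLast? = some '_' then out.dropLast else out
  | c :: cs, out =>
    if c = '&' then tidyLoop cs (out ++ ['a', 'n', 'd'])
    else if c = ' ' ∨ c = '_' ∨ c = '/' then
      (if out ≠ [] ∧ out.getLast? ≠ some '_' then tidyLoop cs (out ++ ['_']) else tidyLoop cs out)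
    else tidyLoop cs (out ++ [c])

def tidy_filename_stem_alt (filename : String) : String :=
  String.ofList (tidyLoop filename.toList [])

-- ===== PRECONDITION & SPEC =====
def Spec_tidy_filename_stem (filename : String) (out : String) : Prop := out = tidy_filename_stem_alt filename
instance (filename : String) (out : String) : Decidable (Spec_tidy_filename_stem filename out) := by unfold Spec_tidy_filename_stem; infer_instance

-- ===== CLAIM (what is proved, stated in full; the proofs are below) =====
def Claim_equal_tidy_filename_stem : Prop := ∀ (filename : String), Dom_tidy_filename_stem filename → Spec_tidy_filename_stem filename (tidy_filename_stem filename)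

-- ===== LEMMAS AND PROOFS =====

-- per-character effect of A's three replacements
def pvRep (c : Char) : List Char :=
  if c = '&' then ['a', 'n', 'd'] else if c = ' ' ∨ c = '_' ∨ c = '/' then ['_'] else [c]

-- B's collapsing loop on the already-replaced character stream
def pvBgo : List Char → List Char → List Char
  | [], out => if out ≠ [] ∧ out.getLast? = some '_' then out.dropLast else out
  | c :: cs, out =>
    if c = '_' then
      (if out ≠ [] ∧ out.getLast? ≠ some '_' then pvBgo cs (out ++ ['_']) else pvBgo cs out)
    else pvBgo cs (out ++ [c])

-- split on '_' with a reversed current-segment accumulator (what Chars.splitOn computes)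
def pvSplit : List Char → List Char → List (List Char)
  | [], cur => [cur.reverse]
  | c :: cs, cur => if c = '_' then cur.reverse :: pvSplit cs [] else pvSplit cs (c :: cur)

-- the nonempty segments only
def pvWords : List Char → List Char → List (List Char)
  | [], cur => if cur = [] then [] else [cur.reverse]
  | c :: cs, cur =>
    if c = '_' then (if cur = [] then pvWords cs [] else cur.reverse :: pvWords cs []) else pvWords cs (c :: cur)

theorem pv_replace_go_single (a : Char) (v : List Char) :
    ∀ (fuel : Nat) (l acc : List Char), l.length ≤ fuel →
      PySem.Chars.replace.go [a] v fuel l acc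
        = acc.reverse ++ l.flatMap (fun c => if c = a then v else [c]) := by
  intro fuel
  induction fuel with
  | zero =>
    intro l acc h
    have : l = [] := List.eq_nil_of_length_eq_zero (Nat.le_zero.mp h)
    subst this; simp [PySem.Chars.replace.go]
  | succ n ih =>
    intro l acc h
    cases l with
    | nil => simp [PySem.Chars.replace.go]
    | cons c t =>
      rw [PySem.Chars.replace.go]
      by_cases hc : c = a
      · simp [hc, List.isPrefixOf, ih t _ (by simpa using h)]
      · simp [List.isPrefixOf, Ne.symm hc, hc, ih t _ (by simpa using h)]

theorem pv_replace_single (l : List Char) (a : Char) (v : List Char) :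
    PySem.Chars.replace l [a] v = l.flatMap (fun c => if c = a then v else [c]) := by
  rw [PySem.Chars.replace]
  simp [pv_replace_go_single a v l.length l [] le_rfl]

theorem pv_replace3 (l : List Char) :
    PySem.Chars.replace (PySem.Chars.replace (PySem.Chars.replace l [' '] ['_']) ['&'] ['a','n','d']) ['/'] ['_']
      = l.flatMap pvRep := by
  simp only [pv_replace_single]
  induction l with
  | nil => simp
  | cons c t ih =>
    by_cases h1 : c = ' ' <;> by_cases h2 : c = '&' <;> by_cases h3 : c = '/' <;> by_cases h4 : c = '_' <;>
      simp_all [pvRep]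

theorem pv_splitOn_go_us :
    ∀ (fuel : Nat) (l cur : List Char) (acc : List (List Char)), l.length < fuel →
      PySem.Chars.splitOn.go ['_'] fuel l cur acc = acc.reverse ++ pvSplit l cur := by
  intro fuel
  induction fuel with
  | zero => intro l cur acc h; omega
  | succ n ih =>
    intro l cur acc h
    cases l with
    | nil => simp [PySem.Chars.splitOn.go, pvSplit]
    | cons c t =>
      rw [PySem.Chars.splitOn.go]
      by_cases hc : c = '_'
      · simp [hc, List.isPrefixOf, pvSplit, ih t [] _ (by simpa using h)]
      · simp [List.isPrefixOf, hc, Ne.symm hc, pvSplit, ih t (c :: cur) _ (by simpa using h)]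

theorem pv_splitOn_us (l : List Char) :
    PySem.Chars.splitOn l ['_'] = pvSplit l [] := by
  rw [PySem.Chars.splitOn]
  simp [pv_splitOn_go_us (l.length + 1) l [] [] (by omega)]

theorem pv_filter_split (l : List Char) : ∀ cur, (pvSplit l cur).filter (fun s => s ≠ []) = pvWords l cur := by
  induction l with
  | nil =>
    intro cur
    by_cases h : cur = [] <;> simp [pvSplit, pvWords, h]
  | cons c t ih =>
    intro cur
    by_cases hc : c = '_'
    · by_cases h : cur = [] <;> simp [pvSplit, pvWords, hc, h] <;> simpa using ih []
    · simp [pvSplit, pvWords, hc]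
      simpa using ih (c :: cur)

theorem pv_tidyLoop_eq_bgo (cs : List Char) : ∀ out, tidyLoop cs out = pvBgo (cs.flatMap pvRep) out := by
  induction cs with
  | nil => intro out; simp [tidyLoop, pvBgo]
  | cons c t ih =>
    intro out
    by_cases h1 : c = '&'
    · simp [tidyLoop, pvBgo, pvRep, h1, ih]
    · by_cases h2 : c = ' ' ∨ c = '_' ∨ c = '/'
      · simp [tidyLoop, pvBgo, pvRep, h1, h2, ih]
      · simp only [not_or] at h2
        simp [tidyLoop, pvBgo, pvRep, h1, h2.1, h2.2.1, h2.2.2, ih]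

theorem pv_bgo_words (m : List Char) :
    ∀ (cur P : List Char), '_' ∉ cur → (P = [] ∨ P.getLast? = some '_') →
      pvBgo m (P ++ cur.reverse)
        = if pvWords m cur = [] then P.dropLast else P ++ PySem.Chars.join ['_'] (pvWords m cur) := by
  induction m with
  | nil =>
    intro cur P hcur hP
    cases cur with
    | nil =>
      rcases hP with hP | hP
      · simp [pvBgo, pvWords, hP]
      · have hne : P ≠ [] := by rintro rfl; simp at hP
        simp [pvBgo, pvWords, hne, hP]
    | cons c cur' =>
      have hlast : (P ++ (c :: cur').reverse).getLast? = some c := by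
        simp [List.getLast?_append]
      have hc : c ≠ '_' := by intro h; exact hcur (h ▸ List.mem_cons_self)
      simp [pvBgo, pvWords, hc, PySem.Chars.join_singleton]
  | cons c t ih =>
    intro cur P hcur hP
    by_cases hc : c = '_'
    · subst hc
      cases cur with
      | nil =>
        rcases hP with hP | hP
        · subst hP
          simp only [pvBgo, pvWords]
          simpa using ih [] [] (by simp) (Or.inl rfl)
        · have hne : P ≠ [] := by rintro rfl; simp at hP
          simp only [pvBgo, pvWords]
          simp only [if_true]
          rw [if_neg (by simp [hne, hP])]
          simpa using ih [] P (by simp) (Or.inr hP)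
      | cons d cur' =>
        have hlast : (P ++ (d :: cur').reverse).getLast? = some d := by
          simp [List.getLast?_append]
        have hd : d ≠ '_' := by intro h; exact hcur (h ▸ List.mem_cons_self)
        simp only [pvBgo, pvWords]
        simp only [if_true, if_neg (List.cons_ne_nil d cur')]
        rw [if_pos (by simp [hd])]
        have h2 := ih [] (P ++ (d :: cur').reverse ++ ['_']) (by simp)
          (Or.inr (by simp))
        simp only [List.reverse_nil, List.append_nil] at h2
        rw [h2]
        by_cases hw : pvWords t [] = []
        · simp [hw, PySem.Chars.join_singleton]
        · cases hwl : pvWords t [] with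
          | nil => exact absurd hwl hw
          | cons w ws =>
            simp [PySem.Chars.join_cons_cons]
    · have hmem : '_' ∉ c :: cur := by
        intro h; rcases List.mem_cons.mp h with h | h
        · exact hc h.symm
        · exact hcur h
      simp only [pvBgo, pvWords, if_neg hc]
      have := ih (c :: cur) P hmem hP
      simpa [List.append_assoc] using this

theorem pv_final (filename : String) : tidy_filename_stem filename = tidy_filename_stem_alt filename := by
  have hsp : " ".toList = [' '] := by decide
  have hus : "_".toList = ['_'] := by decide
  have hand : "and".toList = ['a','n','d'] := by decide
  have hamp : "&".toList = ['&'] := by decide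
  have hsl : "/".toList = ['/'] := by decide
  simp only [tidy_filename_stem, tidy_filename_stem_alt, PySem.Str.replace, PySem.Str.split?,
    PySem.Str.join, PySem.Chars.split?, String.toList_ofList, hsp, hus, hand, hamp, hsl]
  rw [if_neg (by decide), Option.map_some, Option.getD_some, pv_replace3, pv_splitOn_us]
  rw [List.filter_map, List.map_map]
  have hfun : ((fun s => decide (s ≠ "")) ∘ String.ofList) = fun w => decide (w ≠ []) := by
    funext w
    by_cases h : w = []
    · simp [h]
    · simp only [Function.comp]
      have : String.ofList w ≠ "" := by
        intro hh; exact h (by simpa using congrArg String.toList hh)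
      simp [h, this]
  have hcomp : (String.toList ∘ String.ofList) = id := by
    funext w; simp
  rw [hfun, hcomp, List.map_id]
  have hfil : List.filter (fun w => decide (w ≠ [])) (pvSplit (List.flatMap pvRep filename.toList) []) = pvWords (List.flatMap pvRep filename.toList) [] := by
    simpa using pv_filter_split (List.flatMap pvRep filename.toList) []
  rw [hfil]
  congr 1
  rw [pv_tidyLoop_eq_bgo]
  have := pv_bgo_words (List.flatMap pvRep filename.toList) [] [] (by simp) (Or.inl rfl)
  simp only [List.reverse_nil, List.append_nil] at this
  rw [this]
  by_cases hw : pvWords (List.flatMap pvRep filename.toList) [] = []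
  · simp [hw, PySem.Chars.join_nil]
  · simp [hw]

-- ===== VERDICT (by name: the statement is the Claim_ definition above) =====
theorem tidy_filename_stem_spec : Claim_equal_tidy_filename_stem := by
  intro filename _
  exact pv_final filename
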